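-- pv_equiv track=rewrite | github.com/isabella232/Content-Analysis-Chrome-Extension | Political-Chrome-Extension/HttpTrigger/webScrape.py | list_after_cycle
-- ===== SOURCE A (Python) =====
-- def list_after_cycle(article_content_list, cycle):
--     counter = 0
--     items = 0
--
--     temp_list = article_content_list
--
--     cycle_num = int(cycle)
--
--     if (cycle_num != 0):
--         for _ in range(0, cycle_num):
--             while (counter < 5120) and (items < 10) and (temp_list):
--                 if temp_list[0]:
--                     counter += len(temp_list[0])
--                     items += 1
--                     if (counter < 5120) and (items < 10):
--                         del temp_list[0]
--                     else:
--                         break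
--                 else:
--                     del temp_list[0]
--             counter = 0
--             items = 0
--     return temp_list
-- ===== SOURCE B (Python) =====
-- def list_after_cycle(article_content_list, cycle):
--     # Single pass with an index pointer; same truncation logic, then one slice.
--     # Mutates article_content_list in place like the original (one del of a prefix).
--     n = len(article_content_list)
--     i = 0
--     for _ in range(int(cycle)):
--         start = i
--         counter = 0
--         items = 0
--         while i < n:
--             s = article_content_list[i]
--             if s:
--                 counter += len(s)
--                 items += 1
--                 if counter < 5120 and items < 10:
--                     i += 1
--                 else:
--                     break
--             else:
--                 i += 1
--         if i == start:
--             break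
--     del article_content_list[:i]
--     return article_content_list
-- ===== Notes on version B (the rewrite author's own statement) =====
-- stated objective: faster
-- what changed: B advances a single index pointer over the list (with an early exit once a cycle makes no progress) and deletes the prefix with one slice, instead of repeatedly deleting element 0 for each of the cycle iterations.
import Mathlib
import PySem

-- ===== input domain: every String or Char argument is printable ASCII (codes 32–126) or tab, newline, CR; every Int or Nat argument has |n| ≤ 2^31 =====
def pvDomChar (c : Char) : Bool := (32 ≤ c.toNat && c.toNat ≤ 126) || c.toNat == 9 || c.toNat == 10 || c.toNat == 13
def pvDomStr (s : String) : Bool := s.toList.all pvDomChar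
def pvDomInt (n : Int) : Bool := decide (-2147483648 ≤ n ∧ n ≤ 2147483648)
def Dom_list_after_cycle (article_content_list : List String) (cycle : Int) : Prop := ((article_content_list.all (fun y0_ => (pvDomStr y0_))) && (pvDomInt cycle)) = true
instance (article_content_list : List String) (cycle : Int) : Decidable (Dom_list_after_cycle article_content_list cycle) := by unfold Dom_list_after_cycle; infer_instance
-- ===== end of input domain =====

-- ===== PORT A =====
-- B drops the same prefix via an index pointer and one slice instead of repeated del of element 0 (faster).
-- Both Pythons mutate the input list in the same way; the theorems here are about the return value.

-- inner while loop of A: (counter, items, temp_list) -> temp_list after the loop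
def pvWhileA (counter items : Int) (l : List String) : List String :=
  if counter < 5120 ∧ items < 10 then
    match l with
    | [] => []
    | s :: t =>
      if s ≠ "" then
        if counter + PySem.Str.len s < 5120 ∧ items + 1 < 10 then
          pvWhileA (counter + PySem.Str.len s) (items + 1) t
        else s :: t
      else pvWhileA counter items t
  else l
termination_by l.length

-- for _ in range(0, cycle_num): run the while loop with counter = items = 0
def pvCyclesA : Nat → List String → List String
  | 0, l => l
  | n + 1, l => pvCyclesA n (pvWhileA 0 0 l)

def list_after_cycle (article_content_list : List String) (cycle : Int) : List String :=
  pvCyclesA cycle.toNat article_content_list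

-- ===== PORT B =====
-- Source B's inner while loop: advance the index pointer i over xs
def pvAdvanceB (xs : List String) (i : Nat) (counter items : Int) : Nat :=
  if h : i < xs.length then
    let s := xs[i]
    if s ≠ "" then
      if counter + PySem.Str.len s < 5120 ∧ items + 1 < 10 then
        pvAdvanceB xs (i + 1) (counter + PySem.Str.len s) (items + 1)
      else i
    else pvAdvanceB xs (i + 1) counter items
  else i
termination_by xs.length - i

-- Source B's cycle loop with the early exit once a cycle makes no progress
def pvCyclesB (xs : List String) : Nat → Nat → Nat
  | 0, i => i
  | k + 1, i =>
    let j := pvAdvanceB xs i 0 0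
    if j = i then i else pvCyclesB xs k j

def list_after_cycle_alt (article_content_list : List String) (cycle : Int) : List String :=
  article_content_list.drop (pvCyclesB article_content_list cycle.toNat 0)

-- ===== PRECONDITION & SPEC =====
def Spec_list_after_cycle (article_content_list : List String) (cycle : Int) (out : List String) : Prop := out = list_after_cycle_alt article_content_list cycle
instance (article_content_list : List String) (cycle : Int) (out : List String) : Decidable (Spec_list_after_cycle article_content_list cycle out) := by unfold Spec_list_after_cycle; infer_instance

-- ===== CLAIM (what is proved, stated in full; the proofs are below) =====
def Claim_equal_list_after_cycle : Prop := ∀ (article_content_list : List String) (cycle : Int), Dom_list_after_cycle article_content_list cycle → Spec_list_after_cycle article_content_list cycle (list_after_cycle article_content_list cycle)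

-- ===== LEMMAS AND PROOFS =====

-- ===== VERDICT (by name: the statement is the Claim_ definition above) =====
-- pvAdvanceB computes the same drop point as pvWhileA, provided the counters are in range
theorem pv_advance_eq_while (xs : List String) (i : Nat) (counter items : Int)
    (hc : counter < 5120) (hi : items < 10) :
    xs.drop (pvAdvanceB xs i counter items) = pvWhileA counter items (xs.drop i) := by
  fun_induction pvAdvanceB xs i counter items with
  | case1 i counter items h s hne hlt ih =>
    rw [List.drop_eq_getElem_cons h, pvWhileA]
    simp only [hc, hi, and_self, if_true]
    rw [if_pos hne, if_pos hlt, ih hlt.1 hlt.2]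
  | case2 i counter items h s hne hlt =>
    rw [List.drop_eq_getElem_cons h, pvWhileA]
    simp only [hc, hi, and_self, if_true]
    rw [if_pos hne, if_neg hlt]
  | case3 i counter items h s hne ih =>
    rw [List.drop_eq_getElem_cons h, pvWhileA]
    simp only [hc, hi, and_self, if_true]
    rw [if_neg hne, ih hc hi]
  | case4 i counter items h =>
    have : xs.length ≤ i := Nat.le_of_not_lt h
    rw [List.drop_eq_nil_of_le this, pvWhileA]
    simp

theorem pv_while_fix (l : List String) (n : Nat) (h : pvWhileA 0 0 l = l) :
    pvCyclesA n l = l := by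
  induction n with
  | zero => rfl
  | succ k ih => rw [pvCyclesA, h, ih]

theorem pv_cycles_eq (xs : List String) (k i : Nat) :
    pvCyclesA k (xs.drop i) = xs.drop (pvCyclesB xs k i) := by
  induction k generalizing i with
  | zero => rfl
  | succ k ih =>
    rw [pvCyclesB]
    have hadv := pv_advance_eq_while xs i 0 0 (by norm_num) (by norm_num)
    by_cases hj : pvAdvanceB xs i 0 0 = i
    · simp only [hj, if_true]
      exact pv_while_fix _ _ (by rw [← hadv, hj])
    · simp only [if_neg hj]
      rw [pvCyclesA, ← hadv, ih]

theorem list_after_cycle_spec : Claim_equal_list_after_cycle := by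
  intro xs cycle _
  unfold Spec_list_after_cycle list_after_cycle list_after_cycle_alt
  simpa using pv_cycles_eq xs cycle.toNat 0
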